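-- pv_equiv track=rewrite | github.com/macomatom/masters_thesis | src/qa_tools/data_processing.py | count_answer_types_qas
-- ===== SOURCE A (Python) =====
-- def count_answer_types_qas(data, langs):
--     """Counts the occurrences of each answer type in the dataset."""
--     type_counts = {"string": 0, "number": 0, "boolean": 0}
--
--     for order in data:
--         for lang in langs:
--             if lang not in order.get("qas", []):
--                 continue
--
--             for qa in order["qas"][lang]:
--                 answer_type = qa.get("answer_type")
--                 if answer_type in type_counts:
--                     type_counts[answer_type] += 1
--
--     return type_counts
-- ===== SOURCE B (Python) =====
-- def count_answer_types_qas(data, langs):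
--     """Counts the occurrences of each answer type in the dataset."""
--     counts = {"string": 0, "number": 0, "boolean": 0}
--     for order in data:
--         # invert the traversal: walk the stored per-language QA lists and
--         # weight each by how many times its language was requested
--         for lang, qas in order.get("qas", {}).items():
--             m = langs.count(lang)
--             if m:
--                 for qa in qas:
--                     t = qa.get("answer_type")
--                     if t in counts:
--                         counts[t] += m
--     return counts
-- ===== Notes on version B (the rewrite author's own statement) =====
-- stated objective: alternative
-- what changed: B inverts the middle traversal: instead of scanning the requested langs and testing/looking each one up in the order's qas dict, it walks each qas dict's own (lang, qa-list) items once and weights every qa by the multiplicity langs.count(lang); correctness rests on commutativity of the tally.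
import Mathlib
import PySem

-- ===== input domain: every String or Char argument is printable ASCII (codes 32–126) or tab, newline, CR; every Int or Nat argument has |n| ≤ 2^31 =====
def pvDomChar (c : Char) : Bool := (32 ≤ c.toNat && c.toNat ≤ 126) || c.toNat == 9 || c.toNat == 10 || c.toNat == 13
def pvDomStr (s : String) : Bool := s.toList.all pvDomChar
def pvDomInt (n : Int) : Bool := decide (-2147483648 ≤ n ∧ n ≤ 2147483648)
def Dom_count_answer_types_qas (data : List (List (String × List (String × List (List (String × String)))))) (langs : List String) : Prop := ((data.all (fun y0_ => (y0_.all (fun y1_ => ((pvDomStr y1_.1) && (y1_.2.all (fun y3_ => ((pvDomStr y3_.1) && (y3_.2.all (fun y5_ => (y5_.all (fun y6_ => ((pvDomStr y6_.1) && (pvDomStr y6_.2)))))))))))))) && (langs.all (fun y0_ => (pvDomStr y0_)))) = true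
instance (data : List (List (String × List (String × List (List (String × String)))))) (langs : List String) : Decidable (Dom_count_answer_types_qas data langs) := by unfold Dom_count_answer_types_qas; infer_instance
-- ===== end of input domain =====

-- B inverts the middle traversal: it walks each order's qas dict items and weights every qa by
-- langs.count(lang), instead of scanning langs and looking each one up; objective: alternative, not faster.

-- ===== PORT A =====
-- inner 'for qa in order["qas"][lang]' body: answer_type = qa.get("answer_type"); guarded increment
def pvStepQA (tc : PySem.Dict String Int) (qa : List (String × String)) : PySem.Dict String Int :=
  match (PySem.Dict.mk qa).get? "answer_type" with
  | some t => if tc.contains t then tc.modify t 0 (· + 1) else tc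
  | none => tc

def count_answer_types_qas (data : List (List (String × List (String × List (List (String × String)))))) (langs : List String) : List (String × Int) :=
  let init : PySem.Dict String Int := PySem.Dict.mk [("string", 0), ("number", 0), ("boolean", 0)]
  (data.foldl (fun tc order =>
    langs.foldl (fun tc lang =>
      -- 'if lang not in order.get("qas", []): continue'
      if (PySem.Dict.mk ((PySem.Dict.mk order).getD "qas" [])).contains lang then
        (((PySem.Dict.mk ((PySem.Dict.mk order).getD "qas" [])).getD lang []).foldl pvStepQA tc)
      else tc) tc) init).items

-- ===== PORT B =====
-- port of Python's dict.items() for the assoc-list representation: first occurrence of each key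
-- (exact: the list representing a Python dict has distinct keys, so it is the identity there)
def pvItems {β : Type} : List (String × β) → List (String × β)
  | [] => []
  | (k, v) :: rest => (k, v) :: pvItems (rest.filter (fun p => !(p.1 == k)))
termination_by l => l.length
decreasing_by
  simp only [List.length_unattach, List.length_cons]
  exact Nat.lt_succ_of_le (le_trans (List.length_filter_le _ _) (by simp))

-- inner 'for qa in qas: … counts[t] += m' body of Source B, with the weight m
def pvStepQAW (m : Int) (tc : PySem.Dict String Int) (qa : List (String × String)) : PySem.Dict String Int :=
  match (PySem.Dict.mk qa).get? "answer_type" with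
  | some t => if tc.contains t then tc.modify t 0 (· + m) else tc
  | none => tc

def count_answer_types_qas_alt (data : List (List (String × List (String × List (List (String × String)))))) (langs : List String) : List (String × Int) :=
  let init : PySem.Dict String Int := PySem.Dict.mk [("string", 0), ("number", 0), ("boolean", 0)]
  (data.foldl (fun tc order =>
    (pvItems ((PySem.Dict.mk order).getD "qas" [])).foldl (fun tc kv =>
      let m : Int := (langs.count kv.1 : Int)
      if m ≠ 0 then kv.2.foldl (pvStepQAW m) tc else tc) tc) init).items

-- ===== PRECONDITION & SPEC =====
def Spec_count_answer_types_qas (data : List (List (String × List (String × List (List (String × String)))))) (langs : List String) (out : List (String × Int)) : Prop := out = count_answer_types_qas_alt data langs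
instance (data : List (List (String × List (String × List (List (String × String)))))) (langs : List String) (out : List (String × Int)) : Decidable (Spec_count_answer_types_qas data langs out) := by unfold Spec_count_answer_types_qas; infer_instance

-- ===== CLAIM (what is proved, stated in full; the proofs are below) =====
def Claim_equal_count_answer_types_qas : Prop := ∀ (data : List (List (String × List (String × List (List (String × String)))))) (langs : List String), Dom_count_answer_types_qas data langs → Spec_count_answer_types_qas data langs (count_answer_types_qas data langs)

-- ===== LEMMAS AND PROOFS =====

theorem pvItems_nil {β : Type} : pvItems (β := β) [] = [] := by rw [pvItems.eq_def]

theorem pvItems_cons {β : Type} (k : String) (v : β) (rest : List (String × β)) :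
    pvItems ((k, v) :: rest) = (k, v) :: pvItems (rest.filter (fun p => !(p.1 == k))) := by
  rw [pvItems.eq_def]

-- the answer_type of one qa, and the count of type t among a qa list
def pvAT (qa : List (String × String)) : Option String := (PySem.Dict.mk qa).get? "answer_type"
def pvCnt (t : String) (v : List (List (String × String))) : Int := ((v.map pvAT).count (some t) : Int)

-- canonical 3-entry dict used as both accumulators
def pvCanon (a b c : Int) : PySem.Dict String Int :=
  PySem.Dict.mk [("string", a), ("number", b), ("boolean", c)]

theorem pvCanon_eq {a b c a' b' c' : Int} (h1 : a = a') (h2 : b = b') (h3 : c = c') :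
    pvCanon a b c = pvCanon a' b' c' := by rw [h1, h2, h3]

theorem pvStepQAW_canon (m : Int) (qa : List (String × String)) (a b c : Int) :
    pvStepQAW m (pvCanon a b c) qa =
      pvCanon (a + m * List.count (some "string") [pvAT qa])
              (b + m * List.count (some "number") [pvAT qa])
              (c + m * List.count (some "boolean") [pvAT qa]) := by
  unfold pvStepQAW pvCanon pvAT
  cases h : (PySem.Dict.mk qa).get? "answer_type" with
  | none => simp [List.count]
  | some t =>
    by_cases h1 : t = "string"
    · subst h1; simp [PySem.Dict.contains, PySem.Dict.modify, List.count]; rfl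
    · by_cases h2 : t = "number"
      · subst h2; simp [PySem.Dict.contains, PySem.Dict.modify, List.count]; rfl
      · by_cases h3 : t = "boolean"
        · subst h3; simp [PySem.Dict.contains, PySem.Dict.modify, List.count]; rfl
        · have e1 : (t == "string") = false := beq_eq_false_iff_ne.mpr h1
          have e2 : (t == "number") = false := beq_eq_false_iff_ne.mpr h2
          have e3 : (t == "boolean") = false := beq_eq_false_iff_ne.mpr h3
          have e1' : ("string" == t) = false := beq_eq_false_iff_ne.mpr (Ne.symm h1)
          have e2' : ("number" == t) = false := beq_eq_false_iff_ne.mpr (Ne.symm h2)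
          have e3' : ("boolean" == t) = false := beq_eq_false_iff_ne.mpr (Ne.symm h3)
          simp [PySem.Dict.contains, List.count_cons, e1, e2, e3, e1', e2', e3']

theorem pvQAloopW_canon (m : Int) (qas : List (List (String × String))) (a b c : Int) :
    qas.foldl (pvStepQAW m) (pvCanon a b c) =
      pvCanon (a + m * pvCnt "string" qas) (b + m * pvCnt "number" qas) (c + m * pvCnt "boolean" qas) := by
  induction qas generalizing a b c with
  | nil => simp [pvCnt]
  | cons qa rest ih =>
    simp only [List.foldl_cons, pvStepQAW_canon, ih]
    apply pvCanon_eq <;> simp [pvCnt, List.count_cons, List.count_nil] <;> split <;> (try push_cast) <;> ring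

theorem pvQAloop_canon (qas : List (List (String × String))) (a b c : Int) :
    qas.foldl pvStepQA (pvCanon a b c) =
      pvCanon (a + pvCnt "string" qas) (b + pvCnt "number" qas) (c + pvCnt "boolean" qas) := by
  have h : pvStepQA = pvStepQAW 1 := rfl
  rw [h, pvQAloopW_canon]
  simp only [one_mul]

-- A's per-order language loop
theorem pvLangloop_canon (order : List (String × List (String × List (List (String × String)))))
    (langs : List String) (a b c : Int) :
    langs.foldl (fun tc lang =>
      if (PySem.Dict.mk ((PySem.Dict.mk order).getD "qas" [])).contains lang then
        (((PySem.Dict.mk ((PySem.Dict.mk order).getD "qas" [])).getD lang []).foldl pvStepQA tc)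
      else tc) (pvCanon a b c) =
      pvCanon (a + (langs.map (fun lang =>
                if (PySem.Dict.mk ((PySem.Dict.mk order).getD "qas" [])).contains lang then
                  pvCnt "string" ((PySem.Dict.mk ((PySem.Dict.mk order).getD "qas" [])).getD lang [])
                else 0)).sum)
              (b + (langs.map (fun lang =>
                if (PySem.Dict.mk ((PySem.Dict.mk order).getD "qas" [])).contains lang then
                  pvCnt "number" ((PySem.Dict.mk ((PySem.Dict.mk order).getD "qas" [])).getD lang [])
                else 0)).sum)
              (c + (langs.map (fun lang =>
                if (PySem.Dict.mk ((PySem.Dict.mk order).getD "qas" [])).contains lang then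
                  pvCnt "boolean" ((PySem.Dict.mk ((PySem.Dict.mk order).getD "qas" [])).getD lang [])
                else 0)).sum) := by
  induction langs generalizing a b c with
  | nil => simp
  | cons lang rest ih =>
    simp only [List.foldl_cons, List.map_cons, List.sum_cons]
    cases hc : (PySem.Dict.mk ((PySem.Dict.mk order).getD "qas" [])).contains lang with
    | true =>
      simp only [if_true, pvQAloop_canon, ih]
      apply pvCanon_eq <;> ring
    | false =>
      simp only [Bool.false_eq_true, if_false, ih]
      apply pvCanon_eq <;> ring

-- B's per-order items loop
theorem pvItemloop_canon (L : List (String × List (List (String × String))))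
    (langs : List String) (a b c : Int) :
    L.foldl (fun tc kv =>
      let m : Int := (langs.count kv.1 : Int)
      if m ≠ 0 then kv.2.foldl (pvStepQAW m) tc else tc) (pvCanon a b c) =
      pvCanon (a + (L.map (fun kv => (langs.count kv.1 : Int) * pvCnt "string" kv.2)).sum)
              (b + (L.map (fun kv => (langs.count kv.1 : Int) * pvCnt "number" kv.2)).sum)
              (c + (L.map (fun kv => (langs.count kv.1 : Int) * pvCnt "boolean" kv.2)).sum) := by
  induction L generalizing a b c with
  | nil => simp
  | cons kv rest ih =>
    simp only [List.foldl_cons, List.map_cons, List.sum_cons]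
    by_cases hm : ((langs.count kv.1 : Int)) ≠ 0
    · simp only [if_pos hm, pvQAloopW_canon, ih]
      apply pvCanon_eq <;> ring
    · simp only [if_neg hm, ih]
      apply pvCanon_eq <;> rw [not_not.mp hm] <;> ring

-- membership in pvItems
theorem pvItems_subset {β : Type} : ∀ (n : Nat) (l : List (String × β)), l.length ≤ n →
    ∀ {x : String × β}, x ∈ pvItems l → x ∈ l := by
  intro n
  induction n with
  | zero =>
    intro l hl x hx
    rw [List.length_eq_zero_iff.mp (Nat.le_zero.mp hl)] at hx ⊢
    simp [pvItems_nil] at hx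
  | succ n ih =>
    intro l hl x hx
    match l with
    | [] => simp [pvItems_nil] at hx
    | (k, v) :: rest =>
      rw [pvItems_cons] at hx
      rcases List.mem_cons.mp hx with h | h
      · simp [h]
      · have hlen : (rest.filter (fun p => !(p.1 == k))).length ≤ n :=
          le_trans (List.length_filter_le _ _) (by simpa using Nat.le_of_succ_le_succ hl)
        exact List.mem_cons_of_mem _ (List.mem_of_mem_filter (ih _ hlen h))

-- dropping pairs keyed k does not change first-match lookup at lang ≠ k
theorem pvGet_filter {β : Type} (rest : List (String × β)) (k lang : String) (h : lang ≠ k) :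
    (PySem.Dict.mk (rest.filter (fun p => !(p.1 == k)))).get? lang =
      (PySem.Dict.mk rest).get? lang := by
  induction rest with
  | nil => rfl
  | cons p r ih =>
    obtain ⟨k', v'⟩ := p
    by_cases hk : k' = k
    · have hb : (k' == k) = true := beq_iff_eq.mpr hk
      have hne : (k' == lang) = false := beq_eq_false_iff_ne.mpr (by rw [hk]; exact fun e => h e.symm)
      simp only [List.filter_cons, hb, Bool.not_true, Bool.false_eq_true, if_false]
      rw [ih, PySem.Dict.get?_mk_cons, hne]
      simp
    · have hb : (k' == k) = false := beq_eq_false_iff_ne.mpr hk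
      simp only [List.filter_cons, hb, Bool.not_false, if_true]
      rw [PySem.Dict.get?_mk_cons, PySem.Dict.get?_mk_cons, ih]

-- the selection sum over pvItems is exactly A's guarded lookup
theorem pvSel_aux (g : List (List (String × String)) → Int) (lang : String) :
    ∀ (n : Nat) (q : List (String × List (List (String × String)))), q.length ≤ n →
    ((pvItems q).map (fun kv => if kv.1 = lang then g kv.2 else 0)).sum =
      if (PySem.Dict.mk q).contains lang then g ((PySem.Dict.mk q).getD lang []) else 0 := by
  intro n
  induction n with
  | zero =>
    intro q hq
    rw [List.length_eq_zero_iff.mp (Nat.le_zero.mp hq)]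
    simp [pvItems_nil, PySem.Dict.contains]
  | succ n ih =>
    intro q hq
    match q with
    | [] => simp [pvItems_nil, PySem.Dict.contains]
    | (k, v) :: rest =>
      have hlen : (rest.filter (fun p => !(p.1 == k))).length ≤ n :=
        le_trans (List.length_filter_le _ _) (by simpa using Nat.le_of_succ_le_succ hq)
      rw [pvItems_cons]
      simp only [List.map_cons, List.sum_cons]
      by_cases hk : k = lang
      · subst hk
        have hz : ((pvItems (rest.filter (fun p => !(p.1 == k)))).map
            (fun kv => if kv.1 = k then g kv.2 else 0)).sum = 0 := by
          apply List.sum_eq_zero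
          intro x hx
          rcases List.mem_map.mp hx with ⟨kv, hkv, rfl⟩
          have hm := List.of_mem_filter (pvItems_subset _ _ hlen hkv)
          simp only [Bool.not_eq_true'] at hm
          simp [beq_eq_false_iff_ne.mp hm]
        have hget : (PySem.Dict.mk ((k, v) :: rest)).get? k = some v := by
          simp [PySem.Dict.get?_mk_cons]
        rw [hz]
        rw [PySem.Dict.contains_eq_isSome_get?, PySem.Dict.getD_eq_get?_getD, hget]
        simp
      · have hget : (PySem.Dict.mk ((k, v) :: rest)).get? lang = (PySem.Dict.mk rest).get? lang := by
          rw [PySem.Dict.get?_mk_cons]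
          simp [beq_eq_false_iff_ne.mpr hk]
        have hfilter := pvGet_filter rest k lang (fun e => hk e.symm)
        rw [if_neg hk, zero_add, ih _ hlen]
        rw [PySem.Dict.contains_eq_isSome_get?, PySem.Dict.contains_eq_isSome_get?,
            PySem.Dict.getD_eq_get?_getD, PySem.Dict.getD_eq_get?_getD, hfilter, hget]

-- the key reordering identity: A's sum over langs = B's weighted sum over the dict's items
theorem pvKey (q : List (String × List (List (String × String)))) (langs : List String) (t : String) :
    (langs.map (fun lang =>
        if (PySem.Dict.mk q).contains lang then pvCnt t ((PySem.Dict.mk q).getD lang []) else 0)).sum =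
      ((pvItems q).map (fun kv => (langs.count kv.1 : Int) * pvCnt t kv.2)).sum := by
  induction langs with
  | nil => simp
  | cons lang rest ih =>
    simp only [List.map_cons, List.sum_cons, ih]
    have hsplit : ∀ kv : String × List (List (String × String)),
        (((lang :: rest).count kv.1 : Int)) * pvCnt t kv.2 =
          ((rest.count kv.1 : Int)) * pvCnt t kv.2 + (if kv.1 = lang then pvCnt t kv.2 else 0) := by
      intro kv
      rw [List.count_cons]
      by_cases h : kv.1 = lang
      · have hb : (lang == kv.1) = true := beq_iff_eq.mpr h.symm
        rw [hb, if_pos rfl, if_pos h]; push_cast; ring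
      · have hb : (lang == kv.1) = false := beq_eq_false_iff_ne.mpr (fun e => h e.symm)
        rw [hb, if_neg (by simp), if_neg h]; push_cast; ring
    have hmap : ((pvItems q).map (fun kv => ((lang :: rest).count kv.1 : Int) * pvCnt t kv.2)) =
        ((pvItems q).map (fun kv => ((rest.count kv.1 : Int)) * pvCnt t kv.2
          + (if kv.1 = lang then pvCnt t kv.2 else 0))) :=
      List.map_congr_left (fun kv _ => hsplit kv)
    rw [hmap, PySem.List.sum_map_add_int,
        pvSel_aux (pvCnt t) lang q.length q (le_refl _)]
    ring

-- the whole data loop of A equals the whole data loop of B from any canonical accumulator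
theorem pvData_eq (data : List (List (String × List (String × List (List (String × String))))))
    (langs : List String) (a b c : Int) :
    data.foldl (fun tc order =>
      langs.foldl (fun tc lang =>
        if (PySem.Dict.mk ((PySem.Dict.mk order).getD "qas" [])).contains lang then
          (((PySem.Dict.mk ((PySem.Dict.mk order).getD "qas" [])).getD lang []).foldl pvStepQA tc)
        else tc) tc) (pvCanon a b c) =
    data.foldl (fun tc order =>
      (pvItems ((PySem.Dict.mk order).getD "qas" [])).foldl (fun tc kv =>
        let m : Int := (langs.count kv.1 : Int)
        if m ≠ 0 then kv.2.foldl (pvStepQAW m) tc else tc) tc) (pvCanon a b c) := by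
  induction data generalizing a b c with
  | nil => rfl
  | cons order rest ih =>
    simp only [List.foldl_cons, pvLangloop_canon, pvItemloop_canon]
    rw [pvKey, pvKey, pvKey]
    exact ih _ _ _

-- ===== VERDICT (by name: the statement is the Claim_ definition above) =====
theorem count_answer_types_qas_spec : Claim_equal_count_answer_types_qas := by
  intro data langs _
  unfold Spec_count_answer_types_qas count_answer_types_qas count_answer_types_qas_alt
  simp only [show PySem.Dict.mk [("string", (0:Int)), ("number", 0), ("boolean", 0)] = pvCanon 0 0 0 from rfl]
  rw [pvData_eq]
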